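-- pv_equiv track=rewrite | github.com/EdwardBetts/osm-wikidata | matcher/matcher.py | tag_and_key_if_possible
-- ===== SOURCE A (Python) =====
-- def tag_and_key_if_possible(tags):
--     """remove foo if dict contains foo=bar"""
--     key_only = sorted(t for t in tags if "=" not in t)
--     for k in key_only:
--         for t in set(tags):
--             if t.startswith(k + "="):
--                 if k in tags:
--                     tags.remove(k)
--                 continue
--     return tags
-- ===== SOURCE B (Python) =====
-- def tag_and_key_if_possible(tags):
--     """remove foo if dict contains foo=bar"""
--     value_tags = [t for t in tags if "=" in t]
--     tags[:] = [t for t in tags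
--                if "=" in t or not any(v.startswith(t + "=") for v in value_tags)]
--     return tags
-- ===== Notes on version B (the rewrite author's own statement) =====
-- stated objective: simpler
-- what changed: A sorts the bare keys and, per key, rebuilds set(tags) and rescans it with startswith to drive repeated in-place list.remove calls; B builds the value-tag list once and produces the result in a single filter pass that keeps a bare tag only if no value tag starts with it plus '='.
import Mathlib
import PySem

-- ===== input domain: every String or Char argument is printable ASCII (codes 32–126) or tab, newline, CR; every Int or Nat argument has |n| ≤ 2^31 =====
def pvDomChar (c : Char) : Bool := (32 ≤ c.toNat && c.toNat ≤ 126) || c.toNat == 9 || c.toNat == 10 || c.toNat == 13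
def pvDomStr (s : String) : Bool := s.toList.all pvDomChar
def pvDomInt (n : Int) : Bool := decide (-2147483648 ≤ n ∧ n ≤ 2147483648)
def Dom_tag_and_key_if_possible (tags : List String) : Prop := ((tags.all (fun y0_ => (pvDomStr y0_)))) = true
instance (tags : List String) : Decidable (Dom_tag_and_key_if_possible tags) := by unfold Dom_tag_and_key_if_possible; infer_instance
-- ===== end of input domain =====

-- B replaces A's sort + nested set-scan + repeated in-place remove by one filter pass guarded by an
-- `any` over the precomputed value tags (objective: simpler). Both Pythons mutate `tags` in place
-- (A via remove, B via slice assignment); the equivalence proved here is about the returned value.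

-- ===== PORT A =====
-- "=" in t
def pvHasEq (t : String) : Bool := PySem.Str.isIn "=" t

def tag_and_key_if_possible (tags : List String) : List String :=
  -- key_only = sorted(t for t in tags if "=" not in t)
  let key_only := PySem.List.sorted (tags.filter (fun t => !(pvHasEq t))) (fun x => x) false
  -- for k in key_only: for t in set(tags): if t.startswith(k+"="): if k in tags: tags.remove(k)
  key_only.foldl (fun acc k =>
      (PySem.Set.ofList acc).foldl (fun acc2 t =>
          if PySem.Str.startswith t (k ++ "=") then
            (if acc2.contains k then ((PySem.List.remove? acc2 k).getD acc2) else acc2)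
          else acc2)
        acc)
    tags

-- ===== PORT B =====
def tag_and_key_if_possible_alt (tags : List String) : List String :=
  -- value_tags = [t for t in tags if "=" in t]
  let value_tags := tags.filter (fun t => pvHasEq t)
  -- [t for t in tags if "=" in t or not any(v.startswith(t + "=") for v in value_tags)]
  tags.filter (fun t =>
    pvHasEq t || !(value_tags.any (fun v => PySem.Str.startswith v (t ++ "="))))

-- ===== PRECONDITION & SPEC =====
def Spec_tag_and_key_if_possible (tags : List String) (out : List String) : Prop := out = tag_and_key_if_possible_alt tags
instance (tags : List String) (out : List String) : Decidable (Spec_tag_and_key_if_possible tags out) := by unfold Spec_tag_and_key_if_possible; infer_instance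

-- ===== CLAIM (what is proved, stated in full; the proofs are below) =====
def Claim_equal_tag_and_key_if_possible : Prop := ∀ (tags : List String), Dom_tag_and_key_if_possible tags → Spec_tag_and_key_if_possible tags (tag_and_key_if_possible tags)

-- ===== LEMMAS AND PROOFS =====

-- "some tag of `tags` looks like k=…" (the test B's filter makes)
def pvMatched (tags : List String) (k : String) : Bool :=
  (tags.filter pvHasEq).any (fun v => PySem.Str.startswith v (k ++ "="))

-- A's inner loop (over set(tags)) and outer loop, named for the proofs
def pvInner (k : String) (acc : List String) : List String :=
  (PySem.Set.ofList acc).foldl (fun acc2 t =>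
      if PySem.Str.startswith t (k ++ "=") then
        (if acc2.contains k then ((PySem.List.remove? acc2 k).getD acc2) else acc2)
      else acc2)
    acc

def pvOuter (ks : List String) (acc : List String) : List String :=
  ks.foldl (fun a k => pvInner k a) acc

lemma portA_eq (tags : List String) :
    tag_and_key_if_possible tags =
      pvOuter (PySem.List.sorted (tags.filter (fun t => !(pvHasEq t))) (fun x => x) false) tags := rfl

lemma portB_eq (tags : List String) :
    tag_and_key_if_possible_alt tags =
      tags.filter (fun t => pvHasEq t || !(pvMatched tags t)) := rfl

-- a tag starting with "k=" contains "="
lemma startswith_hasEq (k v : String) (h : PySem.Str.startswith v (k ++ "=") = true) :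
    pvHasEq v = true := by
  have h2 : (k ++ "=").toList <+: v.toList := by
    rw [PySem.Str.startswith_eq] at h; exact (PySem.Chars.startswith_iff _ _).mp h
  have h4 : ['='] <:+: (k ++ "=").toList := by
    simp [String.toList_append]; exact (List.suffix_append k.toList ['=']).isInfix
  rw [pvHasEq, PySem.Str.isIn_eq]
  exact (PySem.Chars.isIn_iff_infix _ _).mpr (by simpa using h4.trans h2.isInfix)

-- A's guarded remove is List.erase
lemma step_eq_erase (k : String) (a : List String) (t : String) :
    (if PySem.Str.startswith t (k ++ "=") then
        (if a.contains k then ((PySem.List.remove? a k).getD a) else a)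
      else a)
    = (if PySem.Str.startswith t (k ++ "=") then a.erase k else a) := by
  by_cases hc : k ∈ a
  · have hcc : a.contains k = true := by simpa using hc
    have hr : (PySem.List.remove? a k).getD a = a.erase k := by
      rw [PySem.List.remove?_eq_some_erase _ _ hc]; rfl
    rw [if_pos hcc, hr]
  · have hcc : ¬ (a.contains k = true) := by simpa using hc
    rw [if_neg hcc, List.erase_of_not_mem hc]

lemma inner_eq_foldl_erase (k : String) (acc : List String) :
    pvInner k acc =
      ((PySem.Set.ofList acc).filter (fun t => PySem.Str.startswith t (k ++ "="))).foldl
        (fun a _ => a.erase k) acc := by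
  unfold pvInner
  rw [show (fun (acc2 : List String) (t : String) =>
      if PySem.Str.startswith t (k ++ "=") then
        (if acc2.contains k then ((PySem.List.remove? acc2 k).getD acc2) else acc2)
      else acc2)
    = (fun (acc2 : List String) (t : String) =>
      if PySem.Str.startswith t (k ++ "=") then acc2.erase k else acc2)
    from funext fun a => funext fun t => step_eq_erase k a t]
  exact PySem.List.foldl_if_eq_foldl_filter _ _ _ _

lemma foldl_erase_sublist (k : String) (L : List String) (a : List String) :
    List.Sublist (L.foldl (fun a _ => a.erase k) a) a := by
  induction L generalizing a with
  | nil => simp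
  | cons h t ih => exact (ih (a.erase k)).trans (List.erase_sublist ..)

lemma foldl_erase_count_self (k : String) (L : List String) (a : List String) :
    (L.foldl (fun a _ => a.erase k) a).count k = a.count k - L.length := by
  induction L generalizing a with
  | nil => simp
  | cons h t ih =>
    simp only [List.foldl_cons, ih, List.count_erase_self, List.length_cons]
    omega

lemma foldl_erase_count_ne (k x : String) (hx : x ≠ k) (L : List String) (a : List String) :
    (L.foldl (fun a _ => a.erase k) a).count x = a.count x := by
  induction L generalizing a with
  | nil => rfl
  | cons h t ih => simp only [List.foldl_cons, ih, List.count_erase_of_ne hx]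

-- inner-loop summary
lemma inner_sublist (k : String) (acc : List String) : List.Sublist (pvInner k acc) acc := by
  rw [inner_eq_foldl_erase]; exact foldl_erase_sublist ..

lemma inner_count_ne (k x : String) (hx : x ≠ k) (acc : List String) :
    (pvInner k acc).count x = acc.count x := by
  rw [inner_eq_foldl_erase]; exact foldl_erase_count_ne k x hx ..

lemma inner_count_self_matched (tags : List String) (k : String) (acc : List String)
    (h1 : ∀ x, pvHasEq x = true → acc.count x = tags.count x)
    (hm : pvMatched tags k = true) :
    (pvInner k acc).count k ≤ acc.count k - 1 := by
  rw [inner_eq_foldl_erase, foldl_erase_count_self]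
  obtain ⟨v, hv, hsw⟩ := List.any_eq_true.mp hm
  obtain ⟨hvt, hveq⟩ := List.mem_filter.mp hv
  have hva : v ∈ acc := by
    have hvc := h1 v hveq
    have hp : 0 < acc.count v := by
      rw [hvc]; exact List.count_pos_iff.mpr hvt
    exact List.count_pos_iff.mp hp
  have hvs : v ∈ (PySem.Set.ofList acc).filter (fun t => PySem.Str.startswith t (k ++ "=")) :=
    List.mem_filter.mpr ⟨(PySem.Set.mem_ofList ..).mpr hva, hsw⟩
  have hlp : 0 < ((PySem.Set.ofList acc).filter (fun t => PySem.Str.startswith t (k ++ "="))).length :=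
    List.length_pos_of_mem hvs
  omega

lemma inner_unmatched (tags : List String) (k : String) (acc : List String)
    (h1 : ∀ x, pvHasEq x = true → acc.count x = tags.count x)
    (hm : pvMatched tags k = false) :
    pvInner k acc = acc := by
  rw [inner_eq_foldl_erase]
  have hnil : (PySem.Set.ofList acc).filter (fun t => PySem.Str.startswith t (k ++ "=")) = [] := by
    rw [List.filter_eq_nil_iff]
    intro t ht hsw
    have hteq := startswith_hasEq k t (by simpa using hsw)
    have hta : t ∈ acc := (PySem.Set.mem_ofList ..).mp ht
    have htt : t ∈ tags := by
      have hp : 0 < tags.count t := by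
        rw [← h1 t hteq]; exact List.count_pos_iff.mpr hta
      exact List.count_pos_iff.mp hp
    have hmt : pvMatched tags k = true :=
      List.any_eq_true.mpr ⟨t, List.mem_filter.mpr ⟨htt, hteq⟩, by simpa using hsw⟩
    simp [hmt] at hm
  rw [hnil]; rfl

-- outer-loop invariant: value tags keep their counts, matched bare keys run out of budget
lemma outer_main (tags : List String) (ks : List String) :
    ∀ (acc : List String),
      (∀ k ∈ ks, pvHasEq k = false) →
      (∀ x, pvHasEq x = true → acc.count x = tags.count x) →
      (∀ k, pvHasEq k = false → pvMatched tags k = true → acc.count k ≤ ks.count k) →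
      List.Sublist (pvOuter ks acc) acc ∧
      (∀ x, pvHasEq x = true → (pvOuter ks acc).count x = tags.count x) ∧
      (∀ x, pvHasEq x = false → pvMatched tags x = true → (pvOuter ks acc).count x = 0) ∧
      (∀ x, pvHasEq x = false → pvMatched tags x = false → (pvOuter ks acc).count x = acc.count x) := by
  induction ks with
  | nil =>
    intro acc _ h1 hb
    refine ⟨List.Sublist.refl _, fun x hx => h1 x hx, fun x hx hm => ?_, fun x _ _ => rfl⟩
    have := hb x hx hm
    simpa using this
  | cons k ks ih =>
    intro acc hk h1 hb
    have hkbare : pvHasEq k = false := hk k (by simp)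
    have hktail : ∀ k' ∈ ks, pvHasEq k' = false := fun k' h => hk k' (by simp [h])
    by_cases hm : pvMatched tags k = true
    · -- this pass erases at least one copy of k
      have hsub : List.Sublist (pvInner k acc) acc := inner_sublist k acc
      have h1' : ∀ x, pvHasEq x = true → (pvInner k acc).count x = tags.count x := by
        intro x hx
        have hxk : x ≠ k := fun h => by rw [h] at hx; rw [hkbare] at hx; cases hx
        rw [inner_count_ne k x hxk]; exact h1 x hx
      have hb' : ∀ k', pvHasEq k' = false → pvMatched tags k' = true → (pvInner k acc).count k' ≤ ks.count k' := by
        intro k' hk'b hk'm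
        by_cases hkk : k' = k
        · subst hkk
          have hle := inner_count_self_matched tags k' acc h1 hk'm
          have := hb k' hk'b hk'm
          rw [List.count_cons_self] at this
          omega
        · rw [inner_count_ne k k' hkk]
          have := hb k' hk'b hk'm
          have hne : (k == k') = false := beq_eq_false_iff_ne.mpr (fun h => hkk h.symm)
          simp [List.count_cons, hne] at this
          omega
      obtain ⟨rs, rv, rm, ru⟩ := ih (pvInner k acc) hktail h1' hb'
      have hout : pvOuter (k :: ks) acc = pvOuter ks (pvInner k acc) := rfl
      refine ⟨hout ▸ (rs.trans hsub), fun x hx => hout ▸ rv x hx, fun x hx hm' => hout ▸ rm x hx hm', ?_⟩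
      intro x hx hm'
      have hxk : x ≠ k := fun h => by rw [h] at hm'; rw [hm] at hm'; cases hm'
      rw [hout, ru x hx hm', inner_count_ne k x hxk]
    · -- nothing matches k: the pass is the identity
      have hm' : pvMatched tags k = false := by simpa using hm
      have hid : pvInner k acc = acc := inner_unmatched tags k acc h1 hm'
      have hb' : ∀ k', pvHasEq k' = false → pvMatched tags k' = true → acc.count k' ≤ ks.count k' := by
        intro k' hk'b hk'm
        have hkk : k' ≠ k := fun h => by rw [h] at hk'm; rw [hm'] at hk'm; cases hk'm
        have := hb k' hk'b hk'm
        have hne : (k == k') = false := beq_eq_false_iff_ne.mpr (fun h => hkk h.symm)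
        simp [List.count_cons, hne] at this
        omega
      obtain ⟨rs, rv, rm, ru⟩ := ih acc hktail h1 hb'
      have hout : pvOuter (k :: ks) acc = pvOuter ks acc := by
        show pvOuter ks (pvInner k acc) = pvOuter ks acc
        rw [hid]
      exact ⟨hout ▸ rs, fun x hx => hout ▸ rv x hx, fun x hx hmx => hout ▸ rm x hx hmx,
        fun x hx hmx => hout ▸ ru x hx hmx⟩

-- a sublist whose counts are those of the filter IS the filter
lemma sublist_eq_filter (p : String → Bool) :
    ∀ {s l : List String}, List.Sublist s l →
      (∀ x, s.count x = if p x then l.count x else 0) → s = l.filter p := by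
  intro s l hs
  induction hs with
  | slnil => intro _; rfl
  | cons a hs ih =>
    intro hc
    have hpa : p a = false := by
      by_contra hpa
      have hpa' : p a = true := by simpa using hpa
      have h1 := hc a
      rw [if_pos hpa', List.count_cons_self] at h1
      have := hs.count_le a
      omega
    rw [List.filter_cons_of_neg (by simp [hpa])]
    apply ih
    intro x
    have h1 := hc x
    by_cases hx : x = a
    · subst hx; simp [hpa] at h1 ⊢; exact h1
    · have hax : (a == x) = false := beq_eq_false_iff_ne.mpr (Ne.symm hx)
      simp [List.count_cons, hax] at h1 ⊢; omega
  | cons₂ a hs ih =>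
    intro hc
    have hpa : p a = true := by
      by_contra hpa
      have h1 := hc a
      rw [if_neg hpa, List.count_cons_self] at h1
      omega
    rw [List.filter_cons_of_pos hpa]
    congr 1
    apply ih
    intro x
    have h1 := hc x
    by_cases hx : x = a
    · subst hx
      rw [List.count_cons_self, List.count_cons_self, if_pos hpa] at h1
      rw [if_pos hpa]; omega
    · have hax : (a == x) = false := beq_eq_false_iff_ne.mpr (Ne.symm hx)
      simp [List.count_cons, hax] at h1 ⊢; omega

theorem tag_and_key_if_possible_eq (tags : List String) :
    tag_and_key_if_possible tags = tag_and_key_if_possible_alt tags := by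
  rw [portA_eq, portB_eq]
  have hko : ∀ k ∈ PySem.List.sorted (tags.filter (fun t => !(pvHasEq t))) (fun x => x) false,
      pvHasEq k = false := by
    intro k hk
    have h1 := (PySem.List.mem_sorted ..).mp hk
    have h2 := (List.mem_filter.mp h1).2
    simpa using h2
  have hb : ∀ k, pvHasEq k = false → pvMatched tags k = true →
      tags.count k ≤ (PySem.List.sorted (tags.filter (fun t => !(pvHasEq t))) (fun x => x) false).count k := by
    intro k hkb _
    rw [(PySem.List.sorted_perm ..).count_eq k, List.count_filter (by simp [hkb])]
  obtain ⟨rs, rv, rm, ru⟩ := outer_main tags _ tags hko (fun _ _ => rfl) hb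
  apply sublist_eq_filter _ rs
  intro x
  by_cases hx : pvHasEq x = true
  · rw [if_pos (by simp [hx]), rv x hx]
  · have hx' : pvHasEq x = false := by simpa using hx
    by_cases hm : pvMatched tags x = true
    · rw [rm x hx' hm, if_neg (by simp [hx', hm])]
    · have hm' : pvMatched tags x = false := by simpa using hm
      rw [ru x hx' hm', if_pos (by simp [hx', hm'])]

-- ===== VERDICT (by name: the statement is the Claim_ definition above) =====
theorem tag_and_key_if_possible_spec : Claim_equal_tag_and_key_if_possible := by
  intro tags _
  exact tag_and_key_if_possible_eq tags
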